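-- pv_equiv track=rewrite | github.com/zeun0725/Algorithm_Programmers | brute-force/brute_force_1.py | solution
-- ===== SOURCE A (Python) =====
-- def solution(answers):
--     # -----------------------------
--     # 필요한 변수 선언 부
--     answer = [0] * 3
--
--     one = [1, 2, 3, 4, 5]
--     two = [2, 1, 2, 3, 2, 4, 2, 5]
--     three = [3, 3, 1, 1, 2, 2, 4, 4, 5, 5]
--
--     one_l = len(one)
--     two_l = len(two)
--     three_l = len(three)
--
--     ans_len = len(answers)
--
--     # -----------------------------
--     # 각 수포자의 답지 정답 length 만큼 복사
--     one = one * (ans_len // one_l) + one[:ans_len % one_l]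
--     two = two * (ans_len // two_l) + two[:ans_len % two_l]
--     three = three * (len(answers) // three_l) + three[:len(answers) % three_l]
--
--     # -----------------------------
--     # 각 수포자 답지 비교
--     for o1, t1, t2, a in zip(one, two, three, answers):
--         if a - o1 == 0:
--             answer[0] += 1
--         if a - t1 == 0:
--             answer[1] += 1
--         if a - t2 == 0:
--             answer[2] += 1
--
--     max_ans = max(answer)
--
--     return [i + 1 for i, a in enumerate(answer) if a == max_ans]
-- ===== SOURCE B (Python) =====
-- def solution(answers):
--     # Group answers once by (position mod 40, value): 40 = lcm of the pattern
--     # lengths 5, 8, 10, so each pattern's score is a fixed 40-term lookup sum.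
--     P = 40
--     cnt = {}
--     for i, a in enumerate(answers):
--         k = (i % P, a)
--         cnt[k] = cnt.get(k, 0) + 1
--     patterns = [[1, 2, 3, 4, 5],
--                 [2, 1, 2, 3, 2, 4, 2, 5],
--                 [3, 3, 1, 1, 2, 2, 4, 4, 5, 5]]
--     scores = [sum(cnt.get((j, pat[j % len(pat)]), 0) for j in range(P))
--               for pat in patterns]
--     m = max(scores)
--     return [i + 1 for i, s in enumerate(scores) if s == m]
-- ===== Notes on version B (the rewrite author's own statement) =====
-- stated objective: alternative
-- what changed: B replaces A's precomputed full-length repeated answer sheets and combined zip counting pass by a hash index: one pass builds a dict counting answers grouped by (position mod 40, value) (40 = lcm of the pattern lengths), after which each pattern's score is a fixed 40-term dictionary-lookup sum with no further scan of the answers.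
import Mathlib
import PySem

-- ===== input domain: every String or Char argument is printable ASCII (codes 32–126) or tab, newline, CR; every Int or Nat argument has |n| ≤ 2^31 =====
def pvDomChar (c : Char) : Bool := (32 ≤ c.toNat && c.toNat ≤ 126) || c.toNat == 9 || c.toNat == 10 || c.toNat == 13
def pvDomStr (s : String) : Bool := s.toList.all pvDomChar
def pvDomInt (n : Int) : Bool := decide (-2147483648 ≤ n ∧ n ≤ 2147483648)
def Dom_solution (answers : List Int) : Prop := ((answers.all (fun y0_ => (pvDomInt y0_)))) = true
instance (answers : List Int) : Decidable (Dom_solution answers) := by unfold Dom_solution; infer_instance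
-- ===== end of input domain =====

-- B replaces A's precomputed repeated answer sheets and combined zip pass by a hash
-- index: a dict counting answers grouped by (position mod 40, value), from which each
-- pattern's score is a fixed 40-term lookup sum (objective: alternative).

-- ===== PORT A =====
-- Python `pat * k + pat[:r]` (list repetition plus a take-prefix slice)
def pvExpand (pat : List Int) (n : Nat) : List Int :=
  (List.replicate (n / pat.length) pat).flatten ++ pat.take (n % pat.length)

-- loop body of A's `for o1, t1, t2, a in zip(...)`; the 3-element Python list
-- `answer` is carried as a triple (it has fixed length 3)
def pvStep (acc : Int × Int × Int) (q : Int × Int × Int × Int) : Int × Int × Int :=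
  ((if q.2.2.2 - q.1 = 0 then acc.1 + 1 else acc.1),
   (if q.2.2.2 - q.2.1 = 0 then acc.2.1 + 1 else acc.2.1),
   (if q.2.2.2 - q.2.2.1 = 0 then acc.2.2 + 1 else acc.2.2))

def solution (answers : List Int) : List Int :=
  let one : List Int := [1, 2, 3, 4, 5]
  let two : List Int := [2, 1, 2, 3, 2, 4, 2, 5]
  let three : List Int := [3, 3, 1, 1, 2, 2, 4, 4, 5, 5]
  let n := answers.length
  let one' := pvExpand one n
  let two' := pvExpand two n
  let three' := pvExpand three n
  let acc := (one'.zip (two'.zip (three'.zip answers))).foldl pvStep (0, 0, 0)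
  let answer : List Int := [acc.1, acc.2.1, acc.2.2]
  let maxAns := (PySem.List.max? answer (fun x => x)).getD 0  -- list is nonempty, max? = some
  (PySem.List.enumerate answer).filterMap (fun p => if p.2 = maxAns then some (p.1 + 1) else none)

-- ===== PORT B =====
def solution_alt (answers : List Int) : List Int :=
  -- cnt[k] = cnt.get(k, 0) + 1 over k = (i % 40, a) for i, a in enumerate(answers)
  let cnt := (PySem.List.enumerate answers).foldl
      (fun (d : PySem.Dict (Int × Int) Int) p =>
        let k : Int × Int := (PySem.Int.mod p.1 40, p.2)
        d.insert k (d.getD k 0 + 1))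
      PySem.Dict.empty
  let patterns : List (List Int) :=
    [[1, 2, 3, 4, 5], [2, 1, 2, 3, 2, 4, 2, 5], [3, 3, 1, 1, 2, 2, 4, 4, 5, 5]]
  -- sum(cnt.get((j, pat[j % len(pat)]), 0) for j in range(40))
  let scores := patterns.map (fun pat =>
    ((PySem.List.pyRange 0 40 1).map (fun j =>
        cnt.getD (j, PySem.List.pyGetD pat (PySem.Int.mod j (pat.length : Int)) 0) 0)).sum)
  let m := (PySem.List.max? scores (fun x => x)).getD 0  -- list is nonempty, max? = some
  (PySem.List.enumerate scores).filterMap (fun p => if p.2 = m then some (p.1 + 1) else none)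

-- ===== PRECONDITION & SPEC =====
def Spec_solution (answers : List Int) (out : List Int) : Prop := out = solution_alt answers
instance (answers : List Int) (out : List Int) : Decidable (Spec_solution answers out) := by unfold Spec_solution; infer_instance

-- ===== CLAIM (what is proved, stated in full; the proofs are below) =====
def Claim_equal_solution : Prop := ∀ (answers : List Int), Dom_solution answers → Spec_solution answers (solution answers)

-- ===== LEMMAS AND PROOFS =====

-- the common yardstick both ports are reduced to: per-pattern score as a countP
def pvScore (answers : List Int) (pat : List Int) : Int :=
  (((PySem.List.enumerate answers).countP
      (fun p => p.2 == PySem.List.pyGetD pat (PySem.Int.mod p.1 (pat.length : Int)) 0) : Nat) : Int)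

-- every list is the map of indexing over its range of indices
theorem pvRepr (xs : List Int) : xs = (List.range xs.length).map (fun i => xs.getD i 0) := by
  apply List.ext_getElem
  · simp
  · intro i h1 h2
    simp [List.getD, List.getElem?_eq_getElem h1]

-- a take-prefix is modular indexing over its range
theorem pvTake_eq (pat : List Int) (r : Nat) (hr : r ≤ pat.length) :
    pat.take r = (List.range r).map (fun i => pat.getD (i % pat.length) 0) := by
  apply List.ext_getElem
  · simp [hr]
  · intro i h1 h2
    have hi : i < r := by simpa [hr] using h1
    have hiL : i < pat.length := lt_of_lt_of_le hi hr
    simp [Nat.mod_eq_of_lt hiL, List.getD, List.getElem?_eq_getElem hiL]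

-- A's expanded sheet is modular indexing over range n
theorem pvExpand_eq (pat : List Int) (h : pat ≠ []) (n : Nat) :
    pvExpand pat n = (List.range n).map (fun i => pat.getD (i % pat.length) 0) := by
  have hL : 0 < pat.length := List.length_pos_iff.mpr h
  have key : ∀ (q r : Nat), r ≤ pat.length →
      (List.replicate q pat).flatten ++ pat.take r
        = (List.range (q * pat.length + r)).map (fun i => pat.getD (i % pat.length) 0) := by
    intro q
    induction q with
    | zero => intro r hr; simpa using pvTake_eq pat r hr
    | succ q ih =>
      intro r hr
      have hsplit : (q + 1) * pat.length + r = pat.length + (q * pat.length + r) := by ring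
      rw [hsplit, List.range_add, List.map_append, List.map_map]
      have h1 : (List.range pat.length).map (fun i => pat.getD (i % pat.length) 0) = pat := by
        rw [← pvTake_eq pat pat.length le_rfl, List.take_length]
      have h2 : ((List.range (q * pat.length + r)).map
            ((fun i => pat.getD (i % pat.length) 0) ∘ (fun x => pat.length + x)))
          = (List.range (q * pat.length + r)).map (fun i => pat.getD (i % pat.length) 0) := by
        apply List.map_congr_left
        intro i _
        simp [Function.comp, Nat.add_mod_left]
      rw [h2, h1, ← ih r hr, List.replicate_succ, List.flatten_cons, List.append_assoc]
  have hn : n / pat.length * pat.length + n % pat.length = n := by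
    rw [Nat.mul_comm, Nat.div_add_mod]
  calc pvExpand pat n
        = (List.range (n / pat.length * pat.length + n % pat.length)).map
            (fun i => pat.getD (i % pat.length) 0) := key _ _ (Nat.le_of_lt (Nat.mod_lt n hL))
    _ = _ := by rw [hn]

-- A's counting loop over any quadruple list splits into three counts
theorem pvFold_eq (l : List (Int × Int × Int × Int)) (c : Int × Int × Int) :
    l.foldl pvStep c
      = (c.1 + (l.countP (fun q => q.2.2.2 - q.1 == 0) : Int),
         c.2.1 + (l.countP (fun q => q.2.2.2 - q.2.1 == 0) : Int),
         c.2.2 + (l.countP (fun q => q.2.2.2 - q.2.2.1 == 0) : Int)) := by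
  induction l generalizing c with
  | nil => simp
  | cons x xs ih =>
    rw [List.foldl_cons, ih]
    obtain ⟨c1, c2, c3⟩ := c
    simp only [pvStep, List.countP_cons, Prod.mk.injEq, beq_iff_eq]
    refine ⟨?_, ?_, ?_⟩ <;> split_ifs <;> simp <;> omega

theorem pvSubBeq (a b : Int) : (a - b == 0) = (a == b) := by
  rw [Bool.eq_iff_iff]
  simp [Int.sub_eq_zero]

-- pvScore as a count over the index range (used on A's side)
theorem pvScore_eq_range (answers pat : List Int) :
    pvScore answers pat
      = (((List.range answers.length).countP
            (fun i => answers.getD i 0 == pat.getD (i % pat.length) 0) : Nat) : Int) := by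
  unfold pvScore
  rw [PySem.List.enumerate_eq_map_pyRange answers 0]
  have : PySem.List.len answers = (answers.length : Int) := rfl
  rw [this, PySem.List.pyRange_zero_natCast, List.map_map, List.countP_map]
  congr 1
  apply List.countP_congr
  intro i _
  have hm : PySem.Int.mod (i : Int) ((pat.length : Nat) : Int) = ((i % pat.length : Nat) : Int) :=
    PySem.Int.mod_natCast i pat.length
  simp only [Function.comp_apply, hm, PySem.List.pyGetD_natCast]

-- the zipped counting pass equals the three independent modular scores
theorem pvCountZip (answers pat1 pat2 pat3 : List Int)
    (h1 : pat1 ≠ []) (h2 : pat2 ≠ []) (h3 : pat3 ≠ []) :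
    ((pvExpand pat1 answers.length).zip
        ((pvExpand pat2 answers.length).zip ((pvExpand pat3 answers.length).zip answers))).foldl
      pvStep (0, 0, 0)
      = (pvScore answers pat1, pvScore answers pat2, pvScore answers pat3) := by
  rw [pvExpand_eq pat1 h1, pvExpand_eq pat2 h2, pvExpand_eq pat3 h3,
      pvScore_eq_range, pvScore_eq_range, pvScore_eq_range]
  conv_lhs => rw [show answers = (List.range answers.length).map (fun i => answers.getD i 0) from
    pvRepr answers]
  simp only [List.length_map, List.length_range, List.zip_map', pvFold_eq, List.countP_map,
    zero_add, Prod.mk.injEq]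
  refine ⟨?_, ?_, ?_⟩ <;>
  · congr 1
    apply List.countP_congr
    intro i _
    simp [Function.comp, pvSubBeq]

-- an Int-valued indicator summed over range n hits its single index once
theorem pvIndSum_one (k n : Nat) (hk : k < n) :
    ((List.range n).map (fun (j : Nat) => if j = k then (1 : Int) else 0)).sum = 1 := by
  induction n with
  | zero => omega
  | succ n ih =>
    rw [List.range_succ, List.map_append, List.sum_append]
    by_cases hkn : k = n
    · subst hkn
      have : ∀ j ∈ List.range k, (if j = k then (1 : Int) else 0) = 0 := by
        intro j hj
        have := List.mem_range.mp hj
        simp [Nat.ne_of_lt this]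
      rw [List.map_congr_left this]
      simp
    · have hk' : k < n := by omega
      rw [ih hk']
      have hnk : n ≠ k := fun h => hkn h.symm
      simp [hnk]

-- B side: a 40-bucket sum of counts is one countP, when every key's first
-- component is a residue below 40
theorem pvSumCount (v : Int → Int) (ks : List (Int × Int))
    (h : ∀ q ∈ ks, ∃ k : Nat, k < 40 ∧ q.1 = (k : Int)) :
    ((List.range 40).map (fun (j : Nat) => (ks.count (((j : Int)), v (j : Int)) : Int))).sum
      = ((ks.countP (fun q => q.2 == v q.1) : Nat) : Int) := by
  induction ks with
  | nil => simp
  | cons q ks ih =>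
    obtain ⟨k, hk, hk1⟩ := h q (List.mem_cons_self ..)
    have hks : ∀ p ∈ ks, ∃ k : Nat, k < 40 ∧ p.1 = (k : Int) := by
      intro p hp; exact h p (List.mem_cons_of_mem _ hp)
    have hcount : ∀ j : Nat, ((q :: ks).count (((j : Int)), v (j : Int)) : Int)
        = (ks.count (((j : Int)), v (j : Int)) : Int)
          + (if q = (((j : Int)), v (j : Int)) then (1 : Int) else 0) := by
      intro j
      rw [List.count_cons]
      push_cast
      simp only [beq_iff_eq]
    obtain ⟨q1, q2⟩ := q
    simp only at hk1
    subst hk1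
    have hsum : ((List.range 40).map
          (fun (j : Nat) => if ((k : Int), q2) = (((j : Int)), v (j : Int)) then (1 : Int) else 0)).sum
        = (if q2 == v (k : Int) then (1 : Int) else 0) := by
      by_cases hv : q2 = v (k : Int)
      · have hc : ∀ j ∈ List.range 40,
            (if ((k : Int), q2) = (((j : Int)), v (j : Int)) then (1 : Int) else 0)
              = (if j = k then (1 : Int) else 0) := by
          intro j _
          by_cases hjk : j = k
          · subst hjk; simp [hv]
          · have hne : ¬ ((k : Int), q2) = (((j : Int)), v (j : Int)) := by
              intro he
              simp only [Prod.mk.injEq] at he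
              exact hjk (by exact_mod_cast he.1.symm)
            simp [hne, hjk]
        rw [List.map_congr_left hc, pvIndSum_one k 40 hk]
        simp [hv]
      · have hc : ∀ j ∈ List.range 40,
            (if ((k : Int), q2) = (((j : Int)), v (j : Int)) then (1 : Int) else 0) = 0 := by
          intro j _
          have hne : ¬ ((k : Int), q2) = (((j : Int)), v (j : Int)) := by
            intro he
            simp only [Prod.mk.injEq] at he
            have hjk : j = k := by exact_mod_cast he.1.symm
            subst hjk
            exact hv he.2
          simp [hne]
        rw [List.map_congr_left hc]
        simp [beq_iff_eq, hv]
    calc ((List.range 40).map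
            (fun (j : Nat) => ((((k : Int), q2) :: ks).count (((j : Int)), v (j : Int)) : Int))).sum
        = ((List.range 40).map (fun (j : Nat) => (ks.count (((j : Int)), v (j : Int)) : Int)
            + (if ((k : Int), q2) = (((j : Int)), v (j : Int)) then (1 : Int) else 0))).sum := by
          exact congrArg _ (List.map_congr_left (fun j _ => hcount j))
      _ = ((List.range 40).map (fun (j : Nat) => (ks.count (((j : Int)), v (j : Int)) : Int))).sum
            + ((List.range 40).map
                (fun (j : Nat) => if ((k : Int), q2) = (((j : Int)), v (j : Int)) then (1 : Int) else 0)).sum :=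
          PySem.List.sum_map_add_int _ _ _
      _ = ((ks.countP (fun p => p.2 == v p.1) : Nat) : Int) + (if q2 == v (k : Int) then (1 : Int) else 0) := by
          rw [ih hks, hsum]
      _ = (((((k : Int), q2) :: ks).countP (fun p => p.2 == v p.1) : Nat) : Int) := by
          rw [List.countP_cons]
          push_cast
          split_ifs <;> simp_all

-- B's per-pattern lookup sum over the residue dict equals pvScore
set_option maxHeartbeats 1000000 in
theorem pvScoreB (answers pat : List Int) (hdvd : pat.length ∣ 40) :
    ((PySem.List.pyRange 0 40 1).map (fun j =>
        (PySem.Dict.counter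
            ((PySem.List.enumerate answers).map (fun p => (PySem.Int.mod p.1 40, p.2)))).getD
          (j, PySem.List.pyGetD pat (PySem.Int.mod j (pat.length : Int)) 0) 0)).sum
      = pvScore answers pat := by
  have h40 : (40 : Int) = ((40 : Nat) : Int) := by norm_num
  set ks := (PySem.List.enumerate answers).map (fun p => (PySem.Int.mod p.1 40, p.2)) with hks
  rw [h40, PySem.List.pyRange_zero_natCast, List.map_map]
  have hmem : ∀ q ∈ ks, ∃ k : Nat, k < 40 ∧ q.1 = (k : Int) := by
    intro q hq
    rw [hks] at hq
    obtain ⟨p, hp, rfl⟩ := List.mem_map.mp hq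
    obtain ⟨k0, hk0, rfl⟩ := (PySem.List.mem_enumerate_iff _ _ _).mp hp
    refine ⟨k0 % 40, Nat.mod_lt _ (by norm_num), ?_⟩
    show PySem.Int.mod ((0 : Int) + (k0 : Int)) 40 = ((k0 % 40 : Nat) : Int)
    rw [show ((0 : Int) + (k0 : Int)) = ((k0 : Nat) : Int) by ring, h40]
    exact PySem.Int.mod_natCast k0 40
  have hstep : ((List.range 40).map
        ((fun j => (PySem.Dict.counter ks).getD
            (j, PySem.List.pyGetD pat (PySem.Int.mod j (pat.length : Int)) 0) 0)
          ∘ (fun (j : Nat) => (j : Int)))).sum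
      = ((List.range 40).map (fun (j : Nat) =>
          (ks.count (((j : Int)),
            PySem.List.pyGetD pat (PySem.Int.mod ((j : Int)) (pat.length : Int)) 0) : Int))).sum := by
    apply congrArg
    apply List.map_congr_left
    intro j _
    exact PySem.Dict.getD_counter ks _
  rw [hstep]
  have hsc := pvSumCount
    (fun x => PySem.List.pyGetD pat (PySem.Int.mod x (pat.length : Int)) 0) ks hmem
  rw [hsc, hks, List.countP_map]
  unfold pvScore
  congr 1
  apply List.countP_congr
  intro p hp
  obtain ⟨k0, hk0, rfl⟩ := (PySem.List.mem_enumerate_iff _ _ _).mp hp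
  have hidx : PySem.Int.mod (PySem.Int.mod ((0 : Int) + (k0 : Int)) 40) (pat.length : Int)
      = PySem.Int.mod ((0 : Int) + (k0 : Int)) (pat.length : Int) := by
    rw [show ((0 : Int) + (k0 : Int)) = ((k0 : Nat) : Int) by ring, h40]
    rw [PySem.Int.mod_natCast k0 40,
        PySem.Int.mod_natCast (k0 % 40) pat.length,
        PySem.Int.mod_natCast k0 pat.length,
        Nat.mod_mod_of_dvd k0 hdvd]
  simp only [Function.comp_apply, hidx]

-- B's counting loop is the counter of the residue keys
theorem pvCnt_eq (answers : List Int) :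
    (PySem.List.enumerate answers).foldl
        (fun (d : PySem.Dict (Int × Int) Int) p =>
          let k : Int × Int := (PySem.Int.mod p.1 40, p.2)
          d.insert k (d.getD k 0 + 1))
        PySem.Dict.empty
      = PySem.Dict.counter ((PySem.List.enumerate answers).map (fun p => (PySem.Int.mod p.1 40, p.2))) := by
  rw [← PySem.Dict.foldl_insert_getD_add_one_eq_counter, List.foldl_map]

-- ===== VERDICT (by name: the statement is the Claim_ definition above) =====
set_option maxHeartbeats 1000000 in
theorem solution_spec : Claim_equal_solution := by
  intro answers _
  unfold Spec_solution solution solution_alt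
  simp only [pvCnt_eq, List.map_cons, List.map_nil,
    pvScoreB answers [1, 2, 3, 4, 5] (by decide),
    pvScoreB answers [2, 1, 2, 3, 2, 4, 2, 5] (by decide),
    pvScoreB answers [3, 3, 1, 1, 2, 2, 4, 4, 5, 5] (by decide),
    pvCountZip answers [1, 2, 3, 4, 5] [2, 1, 2, 3, 2, 4, 2, 5]
      [3, 3, 1, 1, 2, 2, 4, 4, 5, 5] (by decide) (by decide) (by decide)]
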